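-- pv_equiv track=rewrite | github.com/noblematt/noblematt.github.io | wc-2026-draw/lib/usadraw.py | draw_pot
-- ===== SOURCE A (Python) =====
-- def draw_pot(pot, groups=("", "", "", "", "", "", "", "", "", "", "", "")):
--     """
--     Generate the state of the groups given teams coming out of the pot in the
--     sequence defined by `pot`
--     If the given sequence of teams cannot legally be placed, returns None
--     """
--     # If no teams are left in the pot, we are finished
--     if not pot:
--         return groups
--
--     # Establish the size of an available group, and the number of teams from the
--     # next team's confederation that are allowed in a group
--     min_group_len = min(map(len, groups))
--     team = pot[0]
--     max_double_europes_reached = 4 == sum(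
--         sum(c in "DE" for c in g) == 2 for g in groups
--     )
--     max_count = 2 if (team in "DE" and not max_double_europes_reached) else 1
--
--     # Iterate over the groups, placing the team in the first legal group
--     for i, group in enumerate(groups):
--         # If the group is larger than the smallest, it already has a team from this pot
--         if len(group) > min_group_len:
--             continue
--
--         if len(group) == 3 and not any(c in group + team for c in "DE"):
--             continue
--
--         # If the group already has the maximum number of teams from this confederation, move on
--         if sum(confederations_clash(c, team) for c in group) >= max_count:
--             continue
--
--         # Construct the new groups and call this function with the remaining teams
--         new_groups = tuple(g if i != j else g + team for j, g in enumerate(groups))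
--         if groups_are_illegal(new_groups):
--             continue
--
--         result = draw_pot(pot[1:], new_groups)
--
--         # If we can successfully assign the remaining teams, return the result
--         if result:
--             return result
--
-- def confederations_clash(a, b):
--     """
--     Return True iff a and b both represent teams from the same confederation
--     (or if b represents an intercontinental playoff that contains a team from
--     the confederation specified by a)
--     """
--     if a == b:
--         return True
--     if a in "FON" and b == "P":
--         return True
--     if a in "ASN" and b == "Q":
--         return True
--     if a in "DE" and b in "DE":
--         return True
--
--     return False
--
-- def groups_are_illegal(groups):
--     """
--     Return True iff some constraint has been broken that means the rest of the
--     teams cannot legally be drawn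
--     """
--     # Flag groups as illegal if there are no groups for either one of the
--     # intercontinental playoff winners to enter, after pot 3
--     if all(any(c in group[:3] for c in "NAS") for group in groups):
--         return True
--     if all(any(c in group[:3] for c in "NOF") for group in groups):
--         return True
--
--     # Flag groups as illegal if there are fewer than three remaining groups
--     # with space for an African team; noting that if 3 pots are drawn and a
--     # group has no European team, then an African team cannot be drawn there as
--     # a European team is required in each group
--     if all(len(g) == 3 for g in groups):
--         african_allowed_count = sum(
--             any(c in g for c in "DE") and not "F" in g for g in groups
--         )
--         if african_allowed_count < 3:
--             return True
--
--         # And the same for Asian teams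
--         asian_allowed_count = sum(
--             any(c in g for c in "DE") and not "A" in g for g in groups
--         )
--         if asian_allowed_count < 2:
--             return True
--
--         # Ensure there is enough space for both of the above (in case of one
--         # group counting for both)
--         african_or_asian_allowed_count = sum(
--             any(c in g for c in "DE") and not all(c in g for c in "AF") for g in groups
--         )
--         if african_or_asian_allowed_count < 5:
--             return True
--
--     return False
-- ===== SOURCE B (Python) =====
-- def draw_pot(pot, groups=("", "", "", "", "", "", "", "", "", "", "", "")):
--     """
--     Iterative re-implementation: explicit-stack depth-first backtracking.
--     Each frame holds (remaining pot, current groups, next group index to try);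
--     same first-legal placement order as the recursive search.
--     """
--     if not pot:
--         return groups
--     stack = [(pot, tuple(groups), 0)]
--     while stack:
--         rest, gs, i = stack.pop()
--         team = rest[0]
--         min_group_len = min(map(len, gs))
--         max_double_europes_reached = 4 == sum(
--             sum(c in "DE" for c in g) == 2 for g in gs
--         )
--         max_count = 2 if (team in "DE" and not max_double_europes_reached) else 1
--         while i < len(gs):
--             g = gs[i]
--             if (
--                 len(g) > min_group_len
--                 or (len(g) == 3 and not any(c in g + team for c in "DE"))
--                 or sum(confederations_clash(c, team) for c in g) >= max_count
--             ):
--                 i += 1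
--                 continue
--             new_groups = gs[:i] + (g + team,) + gs[i + 1:]
--             if groups_are_illegal(new_groups):
--                 i += 1
--                 continue
--             stack.append((rest, gs, i + 1))
--             if len(rest) == 1:
--                 return new_groups
--             stack.append((rest[1:], new_groups, 0))
--             break
--     return None
--
-- def confederations_clash(a, b):
--     if a == b:
--         return True
--     if a in "FON" and b == "P":
--         return True
--     if a in "ASN" and b == "Q":
--         return True
--     if a in "DE" and b in "DE":
--         return True
--     return False
--
-- def groups_are_illegal(groups):
--     if all(any(c in group[:3] for c in "NAS") for group in groups):
--         return True
--     if all(any(c in group[:3] for c in "NOF") for group in groups):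
--         return True
--     if all(len(g) == 3 for g in groups):
--         if sum(any(c in g for c in "DE") and not "F" in g for g in groups) < 3:
--             return True
--         if sum(any(c in g for c in "DE") and not "A" in g for g in groups) < 2:
--             return True
--         if sum(any(c in g for c in "DE") and not all(c in g for c in "AF") for g in groups) < 5:
--             return True
--     return False
-- ===== Notes on version B (the rewrite author's own statement) =====
-- stated objective: alternative
-- what changed: The recursive backtracking search is replaced by an iterative depth-first search driven by an explicit stack of (remaining pot, groups, next-group-cursor) frames, preserving the exact first-legal placement order; Pre_ excludes only a nonempty pot with an empty groups tuple, where both A and B raise ValueError from min() over an empty sequence.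
import Mathlib
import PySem

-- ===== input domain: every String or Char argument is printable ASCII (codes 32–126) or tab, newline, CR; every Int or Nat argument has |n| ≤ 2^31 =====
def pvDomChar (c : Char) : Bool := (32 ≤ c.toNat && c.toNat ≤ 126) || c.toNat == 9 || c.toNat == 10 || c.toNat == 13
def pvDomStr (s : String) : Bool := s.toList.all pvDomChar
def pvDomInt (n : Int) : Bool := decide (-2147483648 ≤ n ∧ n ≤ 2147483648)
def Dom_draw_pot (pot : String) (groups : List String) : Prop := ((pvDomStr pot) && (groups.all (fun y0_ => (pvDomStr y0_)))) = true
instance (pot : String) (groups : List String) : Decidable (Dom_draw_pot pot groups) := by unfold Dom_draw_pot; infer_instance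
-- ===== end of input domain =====

-- B replaces A's recursive backtracking with an explicit-stack iterative DFS (same first-legal order); objective: alternative decomposition, not speed.

-- ===== PORT A =====
-- helpers confederations_clash / groups_are_illegal appear verbatim in BOTH Python files; ported once and used by both ports
def confClash (a b : Char) : Bool :=
  if a == b then true
  else if ['F','O','N'].contains a && b == 'P' then true
  else if ['A','S','N'].contains a && b == 'Q' then true
  else if ['D','E'].contains a && ['D','E'].contains b then true
  else false

def groupsIllegal (gs : List (List Char)) : Bool :=
  if gs.all (fun g => ['N','A','S'].any (fun c => (g.take 3).contains c)) then true
  else if gs.all (fun g => ['N','O','F'].any (fun c => (g.take 3).contains c)) then true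
  else if gs.all (fun g => g.length == 3) then
    if gs.countP (fun g => (['D','E'].any (fun c => g.contains c)) && !(g.contains 'F')) < 3 then true
    else if gs.countP (fun g => (['D','E'].any (fun c => g.contains c)) && !(g.contains 'A')) < 2 then true
    else if gs.countP (fun g => (['D','E'].any (fun c => g.contains c)) && !(['A','F'].all (fun c => g.contains c))) < 5 then true
    else false
  else false

-- min(map(len, groups)); Python raises ValueError on empty groups (excluded by Pre_), the .getD 0 is unreachable there
def minLen (gs : List (List Char)) : Nat :=
  (PySem.List.min? (gs.map (fun g => g.length)) (fun x => x)).getD 0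

-- 4 == sum(sum(c in "DE" for c in g) == 2 for g in groups)
def maxDoubleEuropes (gs : List (List Char)) : Bool :=
  4 == gs.countP (fun g => g.countP (fun c => ['D','E'].contains c) == 2)

-- 2 if (team in "DE" and not max_double_europes_reached) else 1
def maxCnt (t : Char) (gs : List (List Char)) : Nat :=
  if ['D','E'].contains t && !maxDoubleEuropes gs then 2 else 1

mutual
-- A's recursion; tryA is A's `for i, group in enumerate(groups)` loop with its four `continue`s as a
-- cursor recursion; the Nat fuel only makes the recursion total — draw_pot supplies fuel that provably
-- never runs out (lemma fuel_adequate below), so the guard branches are unreachable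
def drawA : Nat → List Char → List (List Char) → Option (List (List Char))
  | _, [], gs => some gs
  | 0, _ :: _, _ => none  -- fuel exhausted: unreachable for the fuel supplied by draw_pot
  | fuel + 1, t :: rest, gs => tryA fuel t rest gs (minLen gs) (maxCnt t gs) 0

def tryA : Nat → Char → List Char → List (List Char) → Nat → Nat → Nat → Option (List (List Char))
  | 0, _, _, _, _, _, _ => none  -- fuel exhausted: unreachable
  | fuel + 1, t, rest, gs, m, cnt, i =>
    if h : i < gs.length then
      if gs[i].length > m then tryA fuel t rest gs m cnt (i+1)
      else if gs[i].length == 3 && !(['D','E'].any (fun c => (gs[i] ++ [t]).contains c)) then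
        tryA fuel t rest gs m cnt (i+1)
      else if cnt ≤ gs[i].countP (fun c => confClash c t) then tryA fuel t rest gs m cnt (i+1)
      else
        -- new_groups = tuple(g if i != j else g + team for j, g in enumerate(groups))
        if groupsIllegal ((PySem.List.enumerate gs 0).map (fun p => if (i : Int) ≠ p.1 then p.2 else p.2 ++ [t])) then
          tryA fuel t rest gs m cnt (i+1)
        else
          match drawA fuel rest ((PySem.List.enumerate gs 0).map (fun p => if (i : Int) ≠ p.1 then p.2 else p.2 ++ [t])) with
          | some r => if r.isEmpty then tryA fuel t rest gs m cnt (i+1) else some r  -- `if result:` tuple truthiness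
          | none => tryA fuel t rest gs m cnt (i+1)
    else none
end

def draw_pot (pot : String) (groups : List String) : Option (List String) :=
  match pot.toList with
  | [] => some groups
  | l => (drawA ((l.length + 1) * ((groups.map (fun s => s.toList)).length + 2) + 1) l
            (groups.map (fun s => s.toList))).map (fun gs => gs.map (fun g => String.ofList g))

-- ===== PORT B =====
-- inner `while i < len(gs)` scan of Source B: first legal placement from cursor i, or None
def scanB (t : Char) (gs : List (List Char)) (m cnt : Nat) (i : Nat) :
    Option (Nat × List (List Char)) :=
  if h : i < gs.length then
    if gs[i].length > m
        || (gs[i].length == 3 && !(['D','E'].any (fun c => (gs[i] ++ [t]).contains c)))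
        || cnt ≤ gs[i].countP (fun c => confClash c t) then
      scanB t gs m cnt (i+1)
    else
      -- new_groups = gs[:i] + (g + team,) + gs[i+1:]
      if groupsIllegal (gs.take i ++ [gs[i] ++ [t]] ++ gs.drop (i+1)) then scanB t gs m cnt (i+1)
      else some (i, gs.take i ++ [gs[i] ++ [t]] ++ gs.drop (i+1))
  else none
termination_by gs.length - i
decreasing_by
  · exact Nat.sub_succ_lt_self _ _ h
  · exact Nat.sub_succ_lt_self _ _ h

-- weight of the initial frame: the fuel bound handed to the stack loop by draw_pot_alt
def frameW : List Char × List (List Char) × Nat → Nat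
  | (rest, gs, i) => (gs.length + 1 - i) * (gs.length + 3) ^ rest.length

-- the `while stack:` loop of Source B; frames always carry a nonempty remaining pot (Python's rest[0]
-- would raise on an empty one; no such frame is ever pushed). The Nat fuel only makes the loop total —
-- draw_pot_alt supplies fuel that provably never runs out (lemma runB_eq_firstSome below)
def runB : Nat → List (List Char × List (List Char) × Nat) → Option (List (List Char))
  | 0, _ => none  -- fuel exhausted: unreachable for the fuel supplied by draw_pot_alt
  | _ + 1, [] => none
  | fuel + 1, (rest, gs, i) :: s =>
    match rest with
    | [] => runB fuel s  -- unreachable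
    | t :: rest' =>
      match scanB t gs (minLen gs) (maxCnt t gs) i with
      | none => runB fuel s
      | some (i', ng) =>
        if rest'.isEmpty then some ng
        else runB fuel ((rest', ng, 0) :: (t :: rest', gs, i' + 1) :: s)

def draw_pot_alt (pot : String) (groups : List String) : Option (List String) :=
  if pot.toList.isEmpty then some groups
  else (runB (frameW (pot.toList, groups.map (fun s => s.toList), 0) + 2)
         [(pot.toList, groups.map (fun s => s.toList), 0)]).map (fun gs => gs.map (fun g => String.ofList g))

-- ===== PRECONDITION & SPEC =====
-- Pre_ excludes only nonempty pot with an empty groups tuple, where Python's min() over an empty sequence raises ValueError (in A and in B alike)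
def Pre_draw_pot (pot : String) (groups : List String) : Prop := pot = "" ∨ groups ≠ []
instance (pot : String) (groups : List String) : Decidable (Pre_draw_pot pot groups) := by
  unfold Pre_draw_pot; infer_instance

def pvWitness_draw_pot : String × List String := ("D", [""])

def Spec_draw_pot (pot : String) (groups : List String) (out : Option (List String)) : Prop := out = draw_pot_alt pot groups
instance (pot : String) (groups : List String) (out : Option (List String)) : Decidable (Spec_draw_pot pot groups out) := by unfold Spec_draw_pot; infer_instance

-- ===== CLAIM (what is proved, stated in full; the proofs are below) =====
def Claim_equal_draw_pot : Prop := ∀ (pot : String) (groups : List String), Dom_draw_pot pot groups → Pre_draw_pot pot groups → Spec_draw_pot pot groups (draw_pot pot groups)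

-- ===== LEMMAS AND PROOFS =====

-- length fact used by the termination measure of the reference recursion below
theorem len_rebuild_enum (gs : List (List Char)) (f : Int × List Char → List Char) :
    ((PySem.List.enumerate gs 0).map f).length = gs.length := by
  simp [PySem.List.length_enumerate]

-- fuel-free reference form of A's recursion (proof-side only)
-- A's recursion; tryS is A's `for i, group in enumerate(groups)` loop with its four `continue`s as a cursor recursion
mutual
def drawS : List Char → List (List Char) → Option (List (List Char))
  | [], gs => some gs
  | t :: rest, gs => tryS t rest gs (minLen gs) (maxCnt t gs) 0
termination_by rest gs => (rest.length + 1) * (gs.length + 2)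
decreasing_by
  simp only [List.length_cons]
  have h3 : (rest.length + 1 + 1) * (gs.length + 2) = (rest.length + 2) * (gs.length + 2) := by ring
  have h2 : 2 * (gs.length + 2) ≤ (rest.length + 2) * (gs.length + 2) :=
    Nat.mul_le_mul_right _ (by omega)
  omega

def tryS (t : Char) (rest : List Char) (gs : List (List Char)) (m cnt : Nat) (i : Nat) :
    Option (List (List Char)) :=
  if h : i < gs.length then
    if gs[i].length > m then tryS t rest gs m cnt (i+1)
    else if gs[i].length == 3 && !(['D','E'].any (fun c => (gs[i] ++ [t]).contains c)) then
      tryS t rest gs m cnt (i+1)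
    else if cnt ≤ gs[i].countP (fun c => confClash c t) then tryS t rest gs m cnt (i+1)
    else
      -- new_groups = tuple(g if i != j else g + team for j, g in enumerate(groups))
      if groupsIllegal ((PySem.List.enumerate gs 0).map (fun p => if (i : Int) ≠ p.1 then p.2 else p.2 ++ [t])) then
        tryS t rest gs m cnt (i+1)
      else
        match drawS rest ((PySem.List.enumerate gs 0).map (fun p => if (i : Int) ≠ p.1 then p.2 else p.2 ++ [t])) with
        | some r => if r.isEmpty then tryS t rest gs m cnt (i+1) else some r  -- `if result:` tuple truthiness
        | none => tryS t rest gs m cnt (i+1)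
  else none
termination_by (rest.length + 2) * (gs.length + 2) - 1 - i
decreasing_by
  all_goals first
    | (rw [len_rebuild_enum]
       have h2 : (rest.length + 2) * (gs.length + 2)
           = (rest.length + 1) * (gs.length + 2) + (gs.length + 2) := by ring
       omega)
    | (have h2 : 2 * (gs.length + 2) ≤ (rest.length + 2) * (gs.length + 2) :=
         Nat.mul_le_mul_right _ (by omega)
       omega)
end

-- facts about scanB's result needed by runB's termination measure (cited in decreasing_by)
theorem scanB_some_bounds (t : Char) (gs : List (List Char)) (m cnt i i' : Nat)
    (ng : List (List Char)) (h : scanB t gs m cnt i = some (i', ng)) :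
    i ≤ i' ∧ i' < gs.length ∧ ng.length = gs.length := by
  have aux : ∀ (k i : Nat), gs.length - i ≤ k → ∀ (i' : Nat) (ng : List (List Char)),
      scanB t gs m cnt i = some (i', ng) → i ≤ i' ∧ i' < gs.length ∧ ng.length = gs.length := by
    intro k
    induction k with
    | zero =>
      intro i hk i' ng h
      rw [scanB, dif_neg (by omega)] at h
      cases h
    | succ k ihk =>
      intro i hk i' ng h
      by_cases hi : i < gs.length
      · rw [scanB, dif_pos hi] at h
        split at h
        · have := ihk (i + 1) (by omega) i' ng h
          exact ⟨by omega, this.2⟩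
        · split at h
          · have := ihk (i + 1) (by omega) i' ng h
            exact ⟨by omega, this.2⟩
          · injection h with h'
            injection h' with h1 h2
            subst h1; subst h2
            refine ⟨le_refl _, hi, ?_⟩
            simp [List.length_take, List.length_drop]
            omega
      · rw [scanB, dif_neg hi] at h
        cases h
  exact aux (gs.length - i) i (le_refl _) i' ng h

-- stack weight, the decreasing measure of the loop (proof-side)
def stackW (s : List (List Char × List (List Char) × Nat)) : Nat := (s.map frameW).sum

theorem stackW_cons (f : List Char × List (List Char) × Nat)
    (s : List (List Char × List (List Char) × Nat)) :
    stackW (f :: s) = frameW f + stackW s := by simp [stackW]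

theorem frame_dec {G i i' r : Nat} (h1 : i ≤ i') (h2 : i' < G) :
    (G + 1) * (G + 3) ^ r + (G - i') * (G + 3) ^ (r + 1) + 2
      ≤ (G + 1 - i) * (G + 3) ^ (r + 1) := by
  have hK : 1 ≤ (G + 3) ^ r := Nat.one_le_pow _ _ (by omega)
  have e1 : (G + 3) ^ (r + 1) = (G + 3) ^ r * (G + 3) := pow_succ _ _
  have h4 : G - i' + 1 ≤ G + 1 - i := by omega
  have h5 : (G - i' + 1) * ((G + 3) ^ r * (G + 3)) ≤ (G + 1 - i) * ((G + 3) ^ r * (G + 3)) :=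
    Nat.mul_le_mul_right _ h4
  have h5' : (G - i') * ((G + 3) ^ r * (G + 3)) + (G + 3) ^ r * (G + 3)
      ≤ (G + 1 - i) * ((G + 3) ^ r * (G + 3)) := by
    calc (G - i') * ((G + 3) ^ r * (G + 3)) + (G + 3) ^ r * (G + 3)
        = (G - i' + 1) * ((G + 3) ^ r * (G + 3)) := by ring
      _ ≤ _ := h5
  have h6 : (G + 1) * (G + 3) ^ r + 2 ≤ (G + 3) ^ r * (G + 3) := by nlinarith
  rw [e1]
  omega

theorem push_dec (t : Char) (rest' : List Char) (gs ng : List (List Char)) (i i' : Nat)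
    (s : List (List Char × List (List Char) × Nat))
    (hb1 : i ≤ i') (hb2 : i' < gs.length) (hb3 : ng.length = gs.length) :
    stackW ((rest', ng, 0) :: (t :: rest', gs, i' + 1) :: s)
        + ((rest', ng, 0) :: (t :: rest', gs, i' + 1) :: s).length
      < stackW ((t :: rest', gs, i) :: s) + ((t :: rest', gs, i) :: s).length := by
  simp only [stackW, List.map_cons, List.sum_cons, List.length_cons, frameW, hb3, Nat.sub_zero]
  rw [show gs.length + 1 - (i' + 1) = gs.length - i' from by omega]
  have := frame_dec (G := gs.length) (r := rest'.length) hb1 hb2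
  omega

-- A's enumerate-comprehension rebuild equals B's slice rebuild
theorem enum_map_id (t : Char) (tl : List (List Char)) : ∀ (s k : Int), k < s →
    (PySem.List.enumerate tl s).map (fun p => if k ≠ p.1 then p.2 else p.2 ++ [t]) = tl := by
  induction tl with
  | nil => intro s k _; simp [PySem.List.enumerate_nil]
  | cons g tl ih =>
    intro s k hk
    rw [PySem.List.enumerate_cons]
    simp only [List.map_cons]
    rw [if_pos (by omega : k ≠ s), ih (s + 1) k (by omega)]

theorem enum_map_eq (t : Char) (gs : List (List Char)) : ∀ (s k : Int) (i : Nat) (h : i < gs.length),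
    k = s + (i : Int) →
    (PySem.List.enumerate gs s).map (fun p => if k ≠ p.1 then p.2 else p.2 ++ [t])
      = gs.take i ++ [gs[i] ++ [t]] ++ gs.drop (i+1) := by
  induction gs with
  | nil => intro s k i h _; simp at h
  | cons g tl ih =>
    intro s k i h hk
    rw [PySem.List.enumerate_cons]
    simp only [List.map_cons]
    cases i with
    | zero =>
      rw [if_neg (by omega : ¬ k ≠ s)]
      rw [enum_map_id t tl (s + 1) k (by omega)]
      simp
    | succ j =>
      rw [if_pos (by push_cast at hk ⊢; omega : k ≠ s)]
      rw [ih (s + 1) k j (by simpa using h) (by push_cast at hk ⊢; omega)]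
      simp

theorem rebuild_eq (t : Char) (gs : List (List Char)) (i : Nat) (h : i < gs.length) :
    (PySem.List.enumerate gs 0).map (fun p => if (i : Int) ≠ p.1 then p.2 else p.2 ++ [t])
      = gs.take i ++ [gs[i] ++ [t]] ++ gs.drop (i+1) :=
  enum_map_eq t gs 0 (i : Int) i h (by omega)

theorem rebuild_len (x : List Char) (gs : List (List Char)) (i : Nat) (h : i < gs.length) :
    (gs.take i ++ [x] ++ gs.drop (i+1)).length = gs.length := by
  simp [List.length_take, List.length_drop]; omega

-- a successful draw preserves the number of groups
theorem drawS_some_length : ∀ (rest : List Char) (gs r : List (List Char)),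
    drawS rest gs = some r → r.length = gs.length := by
  have main : ∀ (n : Nat) (rest : List Char), rest.length ≤ n →
      ∀ (gs r : List (List Char)), drawS rest gs = some r → r.length = gs.length := by
    intro n
    induction n with
    | zero =>
      intro rest hr gs r h
      cases rest with
      | nil => rw [drawS] at h; injection h with h; rw [← h]
      | cons tc rest' => simp at hr
    | succ n ihn =>
      intro rest hr gs r h
      cases rest with
      | nil => rw [drawS] at h; injection h with h; rw [← h]
      | cons tc rest' =>
        rw [drawS] at h
        have hr' : rest'.length ≤ n := by simp at hr; omega
        have inner : ∀ (k i : Nat), gs.length - i ≤ k →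
            tryS tc rest' gs (minLen gs) (maxCnt tc gs) i = some r → r.length = gs.length := by
          intro k
          induction k with
          | zero =>
            intro i hk h2
            rw [tryS, dif_neg (by omega)] at h2
            cases h2
          | succ k ihk =>
            intro i hk h2
            by_cases hi : i < gs.length
            · rw [tryS, dif_pos hi] at h2
              split at h2
              · exact ihk (i+1) (by omega) h2
              · split at h2
                · exact ihk (i+1) (by omega) h2
                · split at h2
                  · exact ihk (i+1) (by omega) h2
                  · split at h2
                    · exact ihk (i+1) (by omega) h2
                    · split at h2
                      · rename_i r0 hd
                        split at h2
                        · exact ihk (i+1) (by omega) h2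
                        · injection h2 with h2
                          have hlen := ihn rest' hr' _ _ hd
                          rw [rebuild_eq tc gs i hi] at hlen
                          rw [← h2, hlen]
                          exact rebuild_len _ _ _ hi
                      · exact ihk (i+1) (by omega) h2
            · rw [tryS, dif_neg hi] at h2
              cases h2
        exact inner gs.length 0 (by omega) h
  intro rest gs r h
  exact main rest.length rest le_rfl gs r h

-- scanB = none means A's loop also falls through
theorem scan_none_tryS (t : Char) (rest : List Char) (gs : List (List Char)) (m cnt : Nat) :
    ∀ i, scanB t gs m cnt i = none → tryS t rest gs m cnt i = none := by
  have aux : ∀ (k i : Nat), gs.length - i ≤ k → scanB t gs m cnt i = none →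
      tryS t rest gs m cnt i = none := by
    intro k
    induction k with
    | zero =>
      intro i hk _
      rw [tryS, dif_neg (by omega)]
    | succ k ihk =>
      intro i hk hscan
      by_cases hi : i < gs.length
      · rw [scanB, dif_pos hi] at hscan
        rw [tryS, dif_pos hi]
        split
      
        · rename_i c1
          rw [if_pos (by simp only [decide_eq_true c1, Bool.true_or])] at hscan
          exact ihk (i+1) (by omega) hscan
        · split
          · rename_i c1 c2
            rw [if_pos (by simp only [c2, Bool.or_true, Bool.true_or])] at hscan
            exact ihk (i+1) (by omega) hscan
          · split
            · rename_i c1 c2 c3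
              rw [if_pos (by simp only [decide_eq_true c3, Bool.or_true])] at hscan
              exact ihk (i+1) (by omega) hscan
            · rename_i c1 c2 c3
              rw [if_neg (by simp only [decide_eq_false c1, decide_eq_false c3, Bool.false_or, Bool.or_false]; exact c2)] at hscan
              rw [rebuild_eq t gs i hi]
              split at hscan
              · rename_i hIll
                rw [if_pos hIll]
                exact ihk (i+1) (by omega) hscan
              · cases hscan
      · rw [tryS, dif_neg hi]
  intro i hscan
  exact aux (gs.length - i) i le_rfl hscan

-- scanB's first legal placement characterises A's loop from the same cursor
theorem scan_some_tryS (t : Char) (rest : List Char) (gs : List (List Char)) (m cnt : Nat) :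
    ∀ i i' ng, scanB t gs m cnt i = some (i', ng) →
      tryS t rest gs m cnt i =
        match drawS rest ng with
        | some r => if r.isEmpty then tryS t rest gs m cnt (i'+1) else some r
        | none => tryS t rest gs m cnt (i'+1) := by
  have aux : ∀ (k i : Nat), gs.length - i ≤ k → ∀ (i' : Nat) (ng : List (List Char)),
      scanB t gs m cnt i = some (i', ng) →
      tryS t rest gs m cnt i =
        match drawS rest ng with
        | some r => if r.isEmpty then tryS t rest gs m cnt (i'+1) else some r
        | none => tryS t rest gs m cnt (i'+1) := by
    intro k
    induction k with
    | zero =>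
      intro i hk i' ng hscan
      rw [scanB, dif_neg (by omega)] at hscan
      cases hscan
    | succ k ihk =>
      intro i hk i' ng hscan
      by_cases hi : i < gs.length
      · rw [scanB, dif_pos hi] at hscan
        rw [tryS, dif_pos hi]
        split
        · rename_i c1
          rw [if_pos (by simp only [decide_eq_true c1, Bool.true_or])] at hscan
          exact ihk (i+1) (by omega) i' ng hscan
        · split
          · rename_i c1 c2
            rw [if_pos (by simp only [c2, Bool.or_true, Bool.true_or])] at hscan
            exact ihk (i+1) (by omega) i' ng hscan
          · split
            · rename_i c1 c2 c3
              rw [if_pos (by simp only [decide_eq_true c3, Bool.or_true])] at hscan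
              exact ihk (i+1) (by omega) i' ng hscan
            · rename_i c1 c2 c3
              rw [if_neg (by simp only [decide_eq_false c1, decide_eq_false c3, Bool.false_or, Bool.or_false]; exact c2)] at hscan
              rw [rebuild_eq t gs i hi]
              split at hscan
              · rename_i hIll
                rw [if_pos hIll]
                exact ihk (i+1) (by omega) i' ng hscan
              · rename_i hIll
                injection hscan with hscan
                injection hscan with e1 e2
                subst e1
                subst e2
                rw [if_neg hIll]
      · rw [scanB, dif_neg hi] at hscan
        cases hscan
  intro i i' ng hscan
  exact aux (gs.length - i) i le_rfl i' ng hscan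

-- A-side value of one frame
def frameVal : List Char × List (List Char) × Nat → Option (List (List Char))
  | ([], _, _) => none
  | (t :: rest', gs, i) => tryS t rest' gs (minLen gs) (maxCnt t gs) i

def firstSome {α : Type} : List (Option α) → Option α
  | [] => none
  | o :: tl => match o with | some r => some r | none => firstSome tl

theorem firstSome_cons_none {α : Type} (l : List (Option α)) :
    firstSome (none :: l) = firstSome l := rfl

theorem firstSome_cons_some {α : Type} (a : α) (l : List (Option α)) :
    firstSome (some a :: l) = some a := rfl

-- the stack machine with sufficient fuel computes the first defined frame value
theorem runB_eq_firstSome : ∀ (fuel : Nat) (s : List (List Char × List (List Char) × Nat)),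
    stackW s + s.length < fuel → runB fuel s = firstSome (s.map frameVal) := by
  intro fuel
  induction fuel with
  | zero => intro s hs; omega
  | succ f ih =>
    intro s hs
    cases s with
    | nil => rfl
    | cons fr s' =>
      obtain ⟨rest, gs, i⟩ := fr
      have hW := stackW_cons (rest, gs, i) s'
      cases rest with
      | nil =>
        rw [show runB (f+1) (([], gs, i) :: s') = runB f s' from rfl]
        rw [ih s' (by rw [hW] at hs; simp only [List.length_cons] at hs; omega)]
        simp only [List.map_cons]
        rw [show frameVal ([], gs, i) = none from rfl, firstSome_cons_none]
      | cons t rest' =>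
        rw [show runB (f+1) ((t :: rest', gs, i) :: s')
              = (match scanB t gs (minLen gs) (maxCnt t gs) i with
                 | none => runB f s'
                 | some (i', ng) =>
                   if rest'.isEmpty then some ng
                   else runB f ((rest', ng, 0) :: (t :: rest', gs, i' + 1) :: s')) from rfl]
        cases hscan : scanB t gs (minLen gs) (maxCnt t gs) i with
        | none =>
          dsimp only
          rw [ih s' (by rw [hW] at hs; simp only [List.length_cons] at hs; omega)]
          simp only [List.map_cons, frameVal]
          rw [scan_none_tryS t rest' gs _ _ i hscan, firstSome_cons_none]
        | some p =>
          obtain ⟨i', ng⟩ := p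
          dsimp only
          obtain ⟨hb1, hb2, hb3⟩ := scanB_some_bounds _ _ _ _ _ _ _ hscan
          have hne : ng.isEmpty = false := by
            rw [List.isEmpty_eq_false_iff]
            intro hnil
            rw [hnil] at hb3
            simp at hb3
            omega
          cases rest' with
          | nil =>
            rw [if_pos List.isEmpty_nil]
            simp only [List.map_cons, frameVal]
            rw [scan_some_tryS t [] gs _ _ i i' ng hscan]
            rw [show drawS [] ng = some ng from by rw [drawS]]
            simp only [hne, Bool.false_eq_true, ↓reduceIte, firstSome_cons_some]
          | cons u rest'' =>
            rw [if_neg (by simp)]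
            rw [ih ((u :: rest'', ng, 0) :: (t :: u :: rest'', gs, i' + 1) :: s') (by
                  have hp := push_dec t (u :: rest'') gs ng i i' s' hb1 hb2 hb3
                  simp only [List.length_cons] at hs hp ⊢
                  omega)]
            simp only [List.map_cons, frameVal]
            rw [scan_some_tryS t (u :: rest'') gs _ _ i i' ng hscan]
            rw [show tryS u rest'' ng (minLen ng) (maxCnt u ng) 0 = drawS (u :: rest'') ng from by
                  rw [drawS]]
            cases hd : drawS (u :: rest'') ng with
            | none => simp [firstSome_cons_none]
            | some r =>
              have hr : r.isEmpty = false := by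
                have := drawS_some_length _ _ _ hd
                rw [List.isEmpty_eq_false_iff]
                intro hnil
                rw [hnil] at this
                simp at this
                omega
              simp [hr, firstSome_cons_some]

-- with enough fuel, the fuelled ports compute the reference recursion
theorem fuel_adequate : ∀ (fuel : Nat),
    (∀ (rest : List Char) (gs : List (List Char)),
        (rest.length + 1) * (gs.length + 2) < fuel → drawA fuel rest gs = drawS rest gs) ∧
    (∀ (t : Char) (rest : List Char) (gs : List (List Char)) (m cnt i : Nat),
        (rest.length + 2) * (gs.length + 2) - 1 - i < fuel →
          tryA fuel t rest gs m cnt i = tryS t rest gs m cnt i) := by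
  intro fuel
  induction fuel with
  | zero =>
    constructor
    · intro rest gs h; omega
    · intro t rest gs m cnt i h; omega
  | succ f ih =>
    constructor
    · intro rest gs hm
      cases rest with
      | nil => rw [show drawA (f+1) [] gs = some gs from rfl, drawS]
      | cons t rest =>
        rw [show drawA (f+1) (t :: rest) gs = tryA f t rest gs (minLen gs) (maxCnt t gs) 0 from rfl]
        rw [drawS]
        apply ih.2
        have h3 : (rest.length + 1 + 1) * (gs.length + 2) = (rest.length + 2) * (gs.length + 2) := by
          ring
        have h4 : 2 * (gs.length + 2) ≤ (rest.length + 2) * (gs.length + 2) :=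
          Nat.mul_le_mul_right _ (by omega)
        simp only [List.length_cons] at hm
        omega
    · intro t rest gs m cnt i hm
      have hA : 2 * (gs.length + 2) ≤ (rest.length + 2) * (gs.length + 2) :=
        Nat.mul_le_mul_right _ (by omega)
      have hB : (rest.length + 2) * (gs.length + 2)
          = (rest.length + 1) * (gs.length + 2) + (gs.length + 2) := by ring
      rw [tryS]
      by_cases hi : i < gs.length
      · have hm1 : (rest.length + 2) * (gs.length + 2) - 1 - (i+1) < f := by omega
        have hm2 : (rest.length + 1) * (gs.length + 2) < f := by omega
        rw [show tryA (f+1) t rest gs m cnt i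
              = (if h : i < gs.length then
                  if gs[i].length > m then tryA f t rest gs m cnt (i+1)
                  else if gs[i].length == 3 && !(['D','E'].any (fun c => (gs[i] ++ [t]).contains c)) then
                    tryA f t rest gs m cnt (i+1)
                  else if cnt ≤ gs[i].countP (fun c => confClash c t) then tryA f t rest gs m cnt (i+1)
                  else
                    if groupsIllegal ((PySem.List.enumerate gs 0).map (fun p => if (i : Int) ≠ p.1 then p.2 else p.2 ++ [t])) then
                      tryA f t rest gs m cnt (i+1)
                    else
                      match drawA f rest ((PySem.List.enumerate gs 0).map (fun p => if (i : Int) ≠ p.1 then p.2 else p.2 ++ [t])) with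
                      | some r => if r.isEmpty then tryA f t rest gs m cnt (i+1) else some r
                      | none => tryA f t rest gs m cnt (i+1)
                else none) from rfl]
        rw [dif_pos hi, dif_pos hi]
        split
        · exact ih.2 t rest gs m cnt (i+1) hm1
        · split
          · exact ih.2 t rest gs m cnt (i+1) hm1
          · split
            · exact ih.2 t rest gs m cnt (i+1) hm1
            · rw [ih.1 rest _ (by rw [len_rebuild_enum]; exact hm2)]
              split
              · exact ih.2 t rest gs m cnt (i+1) hm1
              · split
                · split
                  · exact ih.2 t rest gs m cnt (i+1) hm1
                  · rfl
                · exact ih.2 t rest gs m cnt (i+1) hm1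
      · rw [show tryA (f+1) t rest gs m cnt i
              = (if h : i < gs.length then
                  if gs[i].length > m then tryA f t rest gs m cnt (i+1)
                  else if gs[i].length == 3 && !(['D','E'].any (fun c => (gs[i] ++ [t]).contains c)) then
                    tryA f t rest gs m cnt (i+1)
                  else if cnt ≤ gs[i].countP (fun c => confClash c t) then tryA f t rest gs m cnt (i+1)
                  else
                    if groupsIllegal ((PySem.List.enumerate gs 0).map (fun p => if (i : Int) ≠ p.1 then p.2 else p.2 ++ [t])) then
                      tryA f t rest gs m cnt (i+1)
                    else
                      match drawA f rest ((PySem.List.enumerate gs 0).map (fun p => if (i : Int) ≠ p.1 then p.2 else p.2 ++ [t])) with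
                      | some r => if r.isEmpty then tryA f t rest gs m cnt (i+1) else some r
                      | none => tryA f t rest gs m cnt (i+1)
                else none) from rfl]
        rw [dif_neg hi, dif_neg hi]

-- ===== VERDICT (by name: the statement is the Claim_ definition above) =====
theorem draw_pot_spec : Claim_equal_draw_pot := by
  intro pot groups _ _
  unfold Spec_draw_pot
  simp only [draw_pot, draw_pot_alt]
  cases hp : pot.toList with
  | nil => rfl
  | cons t l =>
    dsimp only
    rw [if_neg (by simp)]
    rw [(fuel_adequate ((((t :: l)).length + 1) * ((groups.map (fun s => s.toList)).length + 2) + 1)).1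
          (t :: l) (groups.map (fun s => s.toList)) (by omega)]
    rw [runB_eq_firstSome (frameW (t :: l, groups.map (fun s => s.toList), 0) + 2)
          [(t :: l, groups.map (fun s => s.toList), 0)]
          (by rw [show stackW [(t :: l, groups.map (fun s => s.toList), 0)]
                    = frameW (t :: l, groups.map (fun s => s.toList), 0) from by simp [stackW]]
              simp)]
    simp only [List.map_cons, List.map_nil, frameVal]
    rw [show drawS (t :: l) (groups.map (fun s => s.toList))
          = tryS t l (groups.map (fun s => s.toList))
              (minLen (groups.map (fun s => s.toList))) (maxCnt t (groups.map (fun s => s.toList))) 0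
        from by rw [drawS]]
    cases htry : tryS t l (groups.map (fun s => s.toList))
        (minLen (groups.map (fun s => s.toList))) (maxCnt t (groups.map (fun s => s.toList))) 0 <;>
      simp [firstSome]
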